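-- pv_equiv track=rewrite | github.com/SebastianAybar/AlgDat | foo.py | boo
-- ===== SOURCE A (Python) =====
-- def boo(arr):
--     x = 0
--     y = 0
--     for i in range(0, len(arr)-1):
--         x = x + arr[i]
--         y = 0
--         for j in range(0, len(arr)-1):
--             y = y + arr[j]
--         x = x + y
--     return x + y + 3
-- ===== SOURCE B (Python) =====
-- def boo(arr):
--     # closed form: A returns (len(arr)+1)*sum(arr[:-1]) + 3
--     return (len(arr) + 1) * sum(arr[:-1]) + 3
-- ===== Notes on version B (the rewrite author's own statement) =====
-- stated objective: faster
-- what changed: replaced the nested O(n^2) accumulation loops by the closed form (len(arr)+1)*sum(arr[:-1])+3 computed in one pass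
import Mathlib
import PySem

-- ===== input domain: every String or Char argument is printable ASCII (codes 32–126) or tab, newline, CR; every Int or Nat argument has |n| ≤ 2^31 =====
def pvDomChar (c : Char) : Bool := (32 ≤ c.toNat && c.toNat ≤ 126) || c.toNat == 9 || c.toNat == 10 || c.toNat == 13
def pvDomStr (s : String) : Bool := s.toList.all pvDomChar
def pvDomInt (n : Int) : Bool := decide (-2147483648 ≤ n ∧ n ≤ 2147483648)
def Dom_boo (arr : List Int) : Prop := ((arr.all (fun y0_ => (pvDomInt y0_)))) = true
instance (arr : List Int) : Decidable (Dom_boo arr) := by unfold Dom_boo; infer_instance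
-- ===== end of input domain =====

-- B replaces A's nested quadratic loops by the closed form (len(arr)+1)*sum(arr[:-1])+3 (objective: faster).

-- ===== PORT A =====
def boo (arr : List Int) : Int :=
  let n : Int := (arr.length : Int)
  let st :=
    (PySem.List.pyRange 0 (n - 1) 1).foldl
      (fun (xy : Int × Int) i =>
        let x := xy.1 + PySem.List.pyGetD arr i 0
        let y := (PySem.List.pyRange 0 (n - 1) 1).foldl
                   (fun y j => y + PySem.List.pyGetD arr j 0) 0
        (x + y, y))
      (0, 0)
  st.1 + st.2 + 3

-- ===== PORT B =====
def boo_alt (arr : List Int) : Int :=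
  ((arr.length : Int) + 1) * (PySem.List.slice arr none (some (-1))).sum + 3

-- ===== PRECONDITION & SPEC =====
def Spec_boo (arr : List Int) (out : Int) : Prop := out = boo_alt arr
instance (arr : List Int) (out : Int) : Decidable (Spec_boo arr out) := by unfold Spec_boo; infer_instance

-- ===== CLAIM (what is proved, stated in full; the proofs are below) =====
def Claim_equal_boo : Prop := ∀ (arr : List Int), Dom_boo arr → Spec_boo arr (boo arr)

-- ===== LEMMAS AND PROOFS =====

-- the inner loop computes sum(arr[:-1])
theorem boo_inner_sum (arr : List Int) :
    (PySem.List.pyRange 0 ((arr.length : Int) - 1) 1).foldl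
      (fun y j => y + PySem.List.pyGetD arr j 0) 0 = arr.dropLast.sum := by
  rcases arr.eq_nil_or_concat' with rfl | ⟨l, a, rfl⟩
  · simp [PySem.List.pyRange_one_eq_nil]
  · have hlen : ((l ++ [a]).length : Int) - 1 = (l.length : Int) := by
      simp
    rw [hlen]
    have hcongr :
        (PySem.List.pyRange 0 (l.length : Int) 1).foldl
          (fun y j => y + PySem.List.pyGetD (l ++ [a]) j 0) 0 =
        (PySem.List.pyRange 0 (l.length : Int) 1).foldl
          (fun y j => y + PySem.List.pyGetD l j 0) 0 := by
      apply PySem.List.foldl_congr_mem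
      intro acc x hx
      rw [PySem.List.mem_pyRange_one] at hx
      have h1 : 0 ≤ x := hx.1
      have h2 : x < (l.length : Int) := hx.2
      rw [PySem.List.pyGetD_eq_getElem (l ++ [a]) 0 h1 (by simp; omega),
          PySem.List.pyGetD_eq_getElem l 0 h1 (by omega)]
      congr 1
      rw [List.getElem_append_left]
    rw [hcongr, PySem.List.foldl_pyRange_zero_pyGetD' l 0 (fun (y v : Int) => y + v) (0 : Int)]
    simp [List.sum_eq_foldl]

-- the outer loop after the inner loop is replaced by the constant S
theorem boo_outer_fold (l : List Int) (S x0 y0 : Int) :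
    l.foldl (fun (xy : Int × Int) v => (xy.1 + v + S, S)) (x0, y0) =
      (x0 + l.sum + (l.length : Int) * S, if l = [] then y0 else S) := by
  induction l generalizing x0 y0 with
  | nil => simp
  | cons a t ih =>
    simp only [List.foldl_cons, ih, List.sum_cons, List.length_cons]
    rcases eq_or_ne t [] with rfl | h
    · simp
    · simp only [ite_self, if_neg (List.cons_ne_nil a t), Prod.mk.injEq]
      exact ⟨by push_cast; ring, trivial⟩

-- ===== VERDICT (by name: the statement is the Claim_ definition above) =====
theorem boo_spec : Claim_equal_boo := by
  intro arr _
  unfold Spec_boo boo boo_alt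
  simp only [PySem.List.slice_to_neg_one]
  have hstep :
      (fun (xy : Int × Int) i =>
        let x := xy.1 + PySem.List.pyGetD arr i 0
        let y := (PySem.List.pyRange 0 ((arr.length : Int) - 1) 1).foldl
                   (fun y j => y + PySem.List.pyGetD arr j 0) 0
        (x + y, y)) =
      (fun (xy : Int × Int) i =>
        (xy.1 + PySem.List.pyGetD arr i 0 + arr.dropLast.sum, arr.dropLast.sum)) := by
    funext xy i
    simp only [boo_inner_sum]
  rw [hstep]
  rcases arr.eq_nil_or_concat' with rfl | ⟨l, a, rfl⟩
  · simp [PySem.List.pyRange_one_eq_nil]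
  · have hlen : (((l ++ [a]).length : Int)) - 1 = (l.length : Int) := by simp
    rw [hlen]
    have hcongr :
        (PySem.List.pyRange 0 (l.length : Int) 1).foldl
          (fun (xy : Int × Int) i =>
            (xy.1 + PySem.List.pyGetD (l ++ [a]) i 0 + (l ++ [a]).dropLast.sum,
             (l ++ [a]).dropLast.sum)) (0, 0) =
        (PySem.List.pyRange 0 (l.length : Int) 1).foldl
          (fun (xy : Int × Int) i =>
            (xy.1 + PySem.List.pyGetD l i 0 + (l ++ [a]).dropLast.sum,
             (l ++ [a]).dropLast.sum)) (0, 0) := by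
      apply PySem.List.foldl_congr_mem
      intro acc x hx
      rw [PySem.List.mem_pyRange_one] at hx
      rw [PySem.List.pyGetD_eq_getElem (l ++ [a]) 0 hx.1 (by simp; omega),
          PySem.List.pyGetD_eq_getElem l 0 hx.1 (by omega)]
      congr 2
      rw [List.getElem_append_left]
    rw [hcongr,
        PySem.List.foldl_pyRange_zero_pyGetD' l 0
          (fun (xy : Int × Int) v =>
            (xy.1 + v + (l ++ [a]).dropLast.sum, (l ++ [a]).dropLast.sum)) ((0 : Int), (0 : Int))]
    simp only [boo_outer_fold, List.dropLast_concat]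
    rcases l with _ | ⟨b, t⟩
    · simp
    · simp only [if_neg (by simp : (b :: t) ≠ [])]
      simp
      ring
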